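-- pv_equiv track=rewrite | github.com/SantosFantasyWorld/toolkit | week4.py | fizz_buzz_sumz
-- ===== SOURCE A (Python) =====
-- def fizz_buzz_sumz(i):
--     x = 1
--     y = 0
--     if i > 0:
--         i=i
--     for x in range(i+1) :
--
--         if x % 3 == 0 and x % 5 != 0:
--             x = 3 * x
--             # y += x
--         elif x % 5 == 0 and x % 3 != 0:
--             x = 5 * x
--             # y += x
--         elif x % 5 == 0 and x % 3 == 0:
--             x = x
--             # y += x
--         else:
--             x = x
--         y += x
--     return y
-- ===== SOURCE B (Python) =====
-- def fizz_buzz_sumz(i):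
--     if i < 0:
--         return 0
--     def tri(d):
--         k = i // d
--         return d * k * (k + 1) // 2
--     return tri(1) + 2 * tri(3) + 4 * tri(5) - 6 * tri(15)
-- ===== Notes on version B (the rewrite author's own statement) =====
-- stated objective: faster
-- what changed: Replaced the linear loop over range(i+1) with a closed-form inclusion-exclusion of triangular sums over the fizz, buzz and fizzbuzz multiples.
import Mathlib
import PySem

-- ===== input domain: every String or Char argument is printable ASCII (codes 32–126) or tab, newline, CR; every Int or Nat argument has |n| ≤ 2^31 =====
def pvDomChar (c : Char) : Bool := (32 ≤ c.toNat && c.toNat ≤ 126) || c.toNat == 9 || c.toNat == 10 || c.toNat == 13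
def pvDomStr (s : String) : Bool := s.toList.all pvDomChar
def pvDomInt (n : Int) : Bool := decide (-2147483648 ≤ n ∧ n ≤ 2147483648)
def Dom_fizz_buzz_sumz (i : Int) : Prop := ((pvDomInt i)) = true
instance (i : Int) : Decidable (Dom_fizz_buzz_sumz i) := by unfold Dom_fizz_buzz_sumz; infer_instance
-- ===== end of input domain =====

-- B computes the same fizzbuzz-weighted sum without a loop, via closed-form triangular
-- sums with inclusion-exclusion over the fizz, buzz and fizzbuzz multiples (objective: faster).

-- ===== PORT A =====
def fizz_buzz_sumz (i : Int) : Int :=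
  (PySem.List.pyRange 0 (i + 1) 1).foldl
    (fun y x =>
      y + (if PySem.Int.mod x 3 = 0 ∧ PySem.Int.mod x 5 ≠ 0 then 3 * x
           else if PySem.Int.mod x 5 = 0 ∧ PySem.Int.mod x 3 ≠ 0 then 5 * x
           else if PySem.Int.mod x 5 = 0 ∧ PySem.Int.mod x 3 = 0 then x
           else x)) 0

-- ===== PORT B =====
-- helper of B: tri(d) = d * k * (k+1) // 2 with k = i // d
def pvTri (i d : Int) : Int :=
  let k := PySem.Int.floordiv i d
  PySem.Int.floordiv (d * k * (k + 1)) 2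

def fizz_buzz_sumz_alt (i : Int) : Int :=
  if i < 0 then 0
  else pvTri i 1 + 2 * pvTri i 3 + 4 * pvTri i 5 - 6 * pvTri i 15

-- ===== PRECONDITION & SPEC =====
def Spec_fizz_buzz_sumz (i : Int) (out : Int) : Prop := out = fizz_buzz_sumz_alt i
instance (i : Int) (out : Int) : Decidable (Spec_fizz_buzz_sumz i out) := by unfold Spec_fizz_buzz_sumz; infer_instance

-- ===== CLAIM (what is proved, stated in full; the proofs are below) =====
def Claim_equal_fizz_buzz_sumz : Prop := ∀ (i : Int), Dom_fizz_buzz_sumz i → Spec_fizz_buzz_sumz i (fizz_buzz_sumz i)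

-- ===== LEMMAS AND PROOFS =====

-- dividing-by-2 step: if the doubled triangular numbers differ by 2*(n+1), the halves differ by n+1
lemma pv_half_step (X Y n : Int) (h : Y = X + 2 * (n + 1)) :
    Y / 2 = X / 2 + (n + 1) := by
  rw [h, show X + 2 * (n + 1) = X + (n + 1) * 2 by ring,
      Int.add_mul_ediv_right _ _ (by norm_num)]

-- step of one B-triangular term for a concrete divisor
lemma pv_tri_step (d n : Int) (_hd : 0 < d) (_hn : 0 ≤ n)
    (hq : (n + 1) / d = n / d + (if (n + 1) % d = 0 then 1 else 0)) :
    d * ((n + 1) / d) * ((n + 1) / d + 1) / 2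
      = d * (n / d) * (n / d + 1) / 2 + (if (n + 1) % d = 0 then n + 1 else 0) := by
  by_cases h : (n + 1) % d = 0
  · simp only [h, if_pos] at hq ⊢
    have hmul : n + 1 = d * ((n + 1) / d) := by
      have := Int.ediv_mul_cancel (Int.dvd_of_emod_eq_zero h)
      linarith
    have h2 : n + 1 = d * (n / d + 1) := by rw [← hq]; exact hmul
    apply pv_half_step
    rw [hq]
    linear_combination (-2) * h2
  · simp only [h, if_false] at hq ⊢
    rw [hq]
    simp

lemma pv_w_eq (x : Int) (_hx : 0 ≤ x) :
    (if PySem.Int.mod x 3 = 0 ∧ PySem.Int.mod x 5 ≠ 0 then 3 * x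
     else if PySem.Int.mod x 5 = 0 ∧ PySem.Int.mod x 3 ≠ 0 then 5 * x
     else if PySem.Int.mod x 5 = 0 ∧ PySem.Int.mod x 3 = 0 then x
     else x)
      = x + 2 * (if x % 3 = 0 then x else 0) + 4 * (if x % 5 = 0 then x else 0)
          - 6 * (if x % 15 = 0 then x else 0) := by
  rw [PySem.Int.mod_eq_emod_of_pos (a := x) (b := 3) (by norm_num),
      PySem.Int.mod_eq_emod_of_pos (a := x) (b := 5) (by norm_num)]
  by_cases h3 : x % 3 = 0 <;> by_cases h5 : x % 5 = 0 <;>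
    have h15 : (x % 15 = 0) ↔ (x % 3 = 0 ∧ x % 5 = 0) := by omega
  all_goals simp [h3, h5, h15] <;> ring

-- the unfolded closed form of B for nonnegative i, with floordiv turned into ediv
lemma pv_alt_eq (i : Int) (hi : 0 ≤ i) :
    fizz_buzz_sumz_alt i
      = i / 1 * (i / 1 + 1) / 2
        + 2 * (3 * (i / 3) * (i / 3 + 1) / 2)
        + 4 * (5 * (i / 5) * (i / 5 + 1) / 2)
        - 6 * (15 * (i / 15) * (i / 15 + 1) / 2) := by
  have hfd : ∀ (a b : Int), 0 < b → PySem.Int.floordiv a b = a / b :=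
    fun a b hb => PySem.Int.floordiv_eq_ediv_of_pos hb
  simp only [fizz_buzz_sumz_alt, pvTri, if_neg (not_lt.mpr hi),
    hfd _ 1 (by norm_num), hfd _ 3 (by norm_num), hfd _ 5 (by norm_num),
    hfd _ 15 (by norm_num), hfd _ 2 (by norm_num)]
  rw [one_mul]

lemma pv_main (n : Nat) : fizz_buzz_sumz (n : Int) = fizz_buzz_sumz_alt (n : Int) := by
  induction n with
  | zero => decide
  | succ m ih =>
    have hcast : ((m + 1 : Nat) : Int) = (m : Int) + 1 := by push_cast; ring
    rw [hcast]
    have hrange : PySem.List.pyRange 0 ((m : Int) + 1 + 1) 1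
        = PySem.List.pyRange 0 ((m : Int) + 1) 1 ++ [(m : Int) + 1] :=
      PySem.List.pyRange_one_succ_right (a := 0) (b := (m : Int) + 1) (by omega)
    unfold fizz_buzz_sumz at ih ⊢
    rw [hrange, List.foldl_append, ih, List.foldl_cons, List.foldl_nil]
    set x : Int := (m : Int) + 1 with hx
    have hx0 : 0 ≤ x := by omega
    have hm0 : (0 : Int) ≤ (m : Int) := Int.natCast_nonneg m
    rw [pv_w_eq x hx0, pv_alt_eq (m : Int) hm0, pv_alt_eq x hx0]
    have t3 : 3 * (x / 3) * (x / 3 + 1) / 2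
        = 3 * ((m : Int) / 3) * ((m : Int) / 3 + 1) / 2 + (if x % 3 = 0 then x else 0) := by
      have hq : ((m : Int) + 1) / 3 = (m : Int) / 3 + (if ((m : Int) + 1) % 3 = 0 then 1 else 0) := by
        split_ifs with h <;> omega
      have := pv_tri_step 3 (m : Int) (by norm_num) hm0 hq
      simpa [hx] using this
    have t5 : 5 * (x / 5) * (x / 5 + 1) / 2
        = 5 * ((m : Int) / 5) * ((m : Int) / 5 + 1) / 2 + (if x % 5 = 0 then x else 0) := by
      have hq : ((m : Int) + 1) / 5 = (m : Int) / 5 + (if ((m : Int) + 1) % 5 = 0 then 1 else 0) := by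
        split_ifs with h <;> omega
      have := pv_tri_step 5 (m : Int) (by norm_num) hm0 hq
      simpa [hx] using this
    have t15 : 15 * (x / 15) * (x / 15 + 1) / 2
        = 15 * ((m : Int) / 15) * ((m : Int) / 15 + 1) / 2 + (if x % 15 = 0 then x else 0) := by
      have hq : ((m : Int) + 1) / 15 = (m : Int) / 15 + (if ((m : Int) + 1) % 15 = 0 then 1 else 0) := by
        split_ifs with h <;> omega
      have := pv_tri_step 15 (m : Int) (by norm_num) hm0 hq
      simpa [hx] using this
    have t1 : x / 1 * (x / 1 + 1) / 2 = (m : Int) / 1 * ((m : Int) / 1 + 1) / 2 + x := by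
      have hq : ((m : Int) + 1) / 1 = (m : Int) / 1 + (if ((m : Int) + 1) % 1 = 0 then 1 else 0) := by
        split_ifs with h <;> omega
      have := pv_tri_step 1 (m : Int) (by norm_num) hm0 hq
      simp only [Int.emod_one, if_pos] at this
      have h1 : ∀ z : Int, 1 * z = z := fun z => one_mul z
      calc x / 1 * (x / 1 + 1) / 2 = 1 * (x / 1) * (x / 1 + 1) / 2 := by ring_nf
        _ = 1 * ((m : Int) / 1) * ((m : Int) / 1 + 1) / 2 + ((m : Int) + 1) := by rw [hx]; exact this
        _ = (m : Int) / 1 * ((m : Int) / 1 + 1) / 2 + x := by rw [hx]; ring_nf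
    rw [t1, t3, t5, t15]
    ring

-- ===== VERDICT (by name: the statement is the Claim_ definition above) =====
theorem fizz_buzz_sumz_spec : Claim_equal_fizz_buzz_sumz := by
  intro i _
  unfold Spec_fizz_buzz_sumz
  by_cases hi : i < 0
  · unfold fizz_buzz_sumz fizz_buzz_sumz_alt
    rw [PySem.List.pyRange_one_eq_nil (a := 0) (b := i + 1) (by omega)]
    simp [hi]
  · obtain ⟨n, rfl⟩ : ∃ n : Nat, i = (n : Int) :=
      ⟨i.toNat, (Int.toNat_of_nonneg (not_lt.mp hi)).symm⟩
    exact pv_main n
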